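-- pv_equiv track=rewrite | github.com/Dandelion4ik/neuron_lab01 | main.py | take_vector
-- ===== SOURCE A (Python) =====
-- def take_vector(number):
--     out_vector = [1]
--     number = bin(number)
--     number = number[2:]
--     for j in range(0, 4):
--         if len(number) != 0:
--             out_vector.append(int(number[-1]))
--             number = number[:-1]
--         else:
--             out_vector.append(int(0))
--     out_vector.reverse()
--     return out_vector
-- ===== SOURCE B (Python) =====
-- def take_vector(number):
--     m = abs(number)
--     return [(m >> 3) & 1, (m >> 2) & 1, (m >> 1) & 1, m & 1, 1]
-- ===== Notes on version B (the rewrite author's own statement) =====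
-- stated objective: simpler
-- what changed: Replaces building bin(number)'s string, the 4-step end-peeling loop with an emptiness branch, and the final reverse() by direct bit arithmetic on abs(number): the four low bits MSB-first plus the trailing 1.
-- crash fix: On -7 <= number <= -1 A raises ValueError (int('b') from the sign's 'b' entering the 4-char window); B returns the four low bits of abs(number) followed by 1. — e.g. on take_vector(-3): A raises ValueError, B returns [0, 0, 1, 1, 1]
import Mathlib
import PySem

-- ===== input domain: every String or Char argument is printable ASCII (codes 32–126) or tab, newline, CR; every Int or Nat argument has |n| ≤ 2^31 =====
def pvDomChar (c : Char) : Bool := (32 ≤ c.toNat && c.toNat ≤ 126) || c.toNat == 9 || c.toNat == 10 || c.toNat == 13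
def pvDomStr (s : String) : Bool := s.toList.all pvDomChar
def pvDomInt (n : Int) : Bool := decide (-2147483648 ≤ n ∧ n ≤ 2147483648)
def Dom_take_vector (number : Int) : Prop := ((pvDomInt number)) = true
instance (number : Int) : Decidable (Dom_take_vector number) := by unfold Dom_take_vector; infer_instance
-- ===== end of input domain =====

-- B replaces A's bin()-string building, end-peeling loop and reverse() by direct bit
-- arithmetic on abs(number) (objective: simpler).

-- ===== PORT A =====

-- binary digits (MSB first) of a natural number; [] for 0 — the digit part of Python's bin()
def pvBinNat : Nat → List Char
  | 0 => []
  | n + 1 => pvBinNat ((n + 1) / 2) ++ [if (n + 1) % 2 = 1 then '1' else '0']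
decreasing_by exact Nat.div_lt_self (by omega) (by omega)

-- Python bin(n): optional '-', then "0b", then digits ("0" for 0)
def pvBinChars (n : Int) : List Char :=
  (if n < 0 then ['-'] else []) ++ ['0', 'b'] ++
    (if n = 0 then ['0'] else pvBinNat n.natAbs)

-- one iteration of A's loop body: state = (out_vector, number-string)
-- int(number[-1]) via PySem.Int.ofStr?; .getD 0 is reached only on the char 'b',
-- where Python raises ValueError — those inputs are excluded by Pre_take_vector.
def pvStep (st : List Int × List Char) : List Int × List Char :=
  if st.2 ≠ [] then
    (st.1 ++ [(PySem.Int.ofStr? (String.ofList [st.2.getLast!])).getD 0], st.2.dropLast)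
  else
    (st.1 ++ [0], st.2)

def take_vector (number : Int) : List Int :=
  let s := (pvBinChars number).drop 2      -- number[2:] (constant nonnegative index)
  let st := (List.range 4).foldl (fun st _ => pvStep st) ([1], s)
  st.1.reverse

-- ===== PORT B =====
def take_vector_alt (number : Int) : List Int :=
  let m := number.natAbs                   -- abs(number)
  [((m >>> 3 &&& 1 : Nat) : Int), ((m >>> 2 &&& 1 : Nat) : Int),
   ((m >>> 1 &&& 1 : Nat) : Int), ((m &&& 1 : Nat) : Int), 1]

-- ===== PRECONDITION & SPEC =====
-- A raises ValueError (int('b')) for -7 ≤ number ≤ -1: the 'b' of '-0b…' enters the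
-- 4-character window. Pre_ excludes exactly those inputs.
def Pre_take_vector (number : Int) : Prop := 0 ≤ number ∨ number ≤ -8
instance (number : Int) : Decidable (Pre_take_vector number) := by unfold Pre_take_vector; infer_instance
def pvWitness_take_vector : Int := (5)

-- On -7 ≤ number ≤ -1 A raises ValueError (int('b')); B returns the four low bits of abs(number) followed by 1.
def Raises_take_vector (number : Int) : Prop := -8 < number ∧ number < 0
instance (number : Int) : Decidable (Raises_take_vector number) := by unfold Raises_take_vector; infer_instance
def pvRaiseWitness_take_vector : Int := (-3)
def pvRaiseWitnessOut_take_vector : List Int := [0, 0, 1, 1, 1]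

def Spec_take_vector (number : Int) (out : List Int) : Prop := out = take_vector_alt number
instance (number : Int) (out : List Int) : Decidable (Spec_take_vector number out) := by unfold Spec_take_vector; infer_instance

-- ===== CLAIM (what is proved, stated in full; the proofs are below) =====
def Claim_equal_take_vector : Prop := ∀ (number : Int), Dom_take_vector number → Pre_take_vector number → Spec_take_vector number (take_vector number)
def Claim_raises_take_vector : Prop := (∀ (number : Int), Dom_take_vector number → Raises_take_vector number → ¬ Pre_take_vector number) ∧ (Dom_take_vector (pvRaiseWitness_take_vector) ∧ Raises_take_vector (pvRaiseWitness_take_vector) ∧ take_vector_alt (pvRaiseWitness_take_vector) = pvRaiseWitnessOut_take_vector)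

-- ===== LEMMAS AND PROOFS =====

lemma pvBinNat_pos (n : Nat) (h : 0 < n) :
    pvBinNat n = pvBinNat (n / 2) ++ [if n % 2 = 1 then '1' else '0'] := by
  cases n with
  | zero => omega
  | succ k => rw [pvBinNat]

lemma pvStep_concat (l : List Char) (c : Char) (out : List Int) :
    pvStep (out, l ++ [c]) = (out ++ [(PySem.Int.ofStr? (String.ofList [c])).getD 0], l) := by
  simp [pvStep]

lemma pvStep_bin (n : Nat) (out : List Int) :
    pvStep (out, pvBinNat n) = (out ++ [((n % 2 : Nat) : Int)], pvBinNat (n / 2)) := by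
  rcases Nat.eq_zero_or_pos n with h | h
  · subst h; simp [pvStep, pvBinNat]
  · rw [pvBinNat_pos n h, pvStep_concat]
    rcases Nat.mod_two_eq_zero_or_one n with h2 | h2 <;> simp [h2] <;> decide

lemma pvStep_pre (n : Nat) (out : List Int) (h : 0 < n) :
    pvStep (out, 'b' :: pvBinNat n) = (out ++ [((n % 2 : Nat) : Int)], 'b' :: pvBinNat (n / 2)) := by
  rw [pvBinNat_pos n h]
  have : 'b' :: (pvBinNat (n / 2) ++ [if n % 2 = 1 then '1' else '0'])
       = ('b' :: pvBinNat (n / 2)) ++ [if n % 2 = 1 then '1' else '0'] := by simp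
  rw [this, pvStep_concat]
  rcases Nat.mod_two_eq_zero_or_one n with h2 | h2 <;> simp [h2] <;> decide

lemma bits_eq (m : Nat) :
    ([((m / 8 % 2 : Nat) : Int), ((m / 4 % 2 : Nat) : Int), ((m / 2 % 2 : Nat) : Int),
      ((m % 2 : Nat) : Int), (1 : Int)])
    = [((m >>> 3 &&& 1 : Nat) : Int), ((m >>> 2 &&& 1 : Nat) : Int),
       ((m >>> 1 &&& 1 : Nat) : Int), ((m &&& 1 : Nat) : Int), 1] := by
  simp [Nat.shiftRight_eq_div_pow, Nat.and_one_is_mod]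

lemma fold_bin (m : Nat) :
    ((List.range 4).foldl (fun st _ => pvStep st) ([1], pvBinNat m)).1.reverse
    = [((m / 8 % 2 : Nat) : Int), ((m / 4 % 2 : Nat) : Int), ((m / 2 % 2 : Nat) : Int),
       ((m % 2 : Nat) : Int), (1 : Int)] := by
  have e : (List.range 4) = [0, 1, 2, 3] := by decide
  rw [e]
  simp only [List.foldl]
  rw [pvStep_bin, pvStep_bin, pvStep_bin, pvStep_bin]
  simp [Nat.div_div_eq_div_mul]

lemma fold_pre (m : Nat) (h : 8 ≤ m) :
    ((List.range 4).foldl (fun st _ => pvStep st) ([1], 'b' :: pvBinNat m)).1.reverse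
    = [((m / 8 % 2 : Nat) : Int), ((m / 4 % 2 : Nat) : Int), ((m / 2 % 2 : Nat) : Int),
       ((m % 2 : Nat) : Int), (1 : Int)] := by
  have e : (List.range 4) = [0, 1, 2, 3] := by decide
  rw [e]
  simp only [List.foldl]
  rw [pvStep_pre m _ (by omega), pvStep_pre (m / 2) _ (by omega),
      pvStep_pre (m / 2 / 2) _ (by omega), pvStep_pre (m / 2 / 2 / 2) _ (by omega)]
  simp [Nat.div_div_eq_div_mul]

-- ===== VERDICT (by name: the statement is the Claim_ definition above) =====
theorem take_vector_spec : Claim_equal_take_vector := by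
  intro number _ hPre
  unfold Spec_take_vector
  by_cases h0 : number = 0
  · subst h0; decide
  rcases hPre with hpos | hneg
  · -- number > 0 : bin string is "0b" ++ digits; after [2:] just the digits
    have hlt : ¬ number < 0 := by omega
    have hd : (pvBinChars number).drop 2 = pvBinNat number.natAbs := by
      simp [pvBinChars, hlt, h0]
    rw [take_vector, take_vector_alt]
    simp only [hd, fold_bin, bits_eq]
  · -- number ≤ -8 : bin string is "-0b" ++ digits; after [2:] 'b' followed by the digits
    have hlt : number < 0 := by omega
    have hd : (pvBinChars number).drop 2 = 'b' :: pvBinNat number.natAbs := by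
      simp [pvBinChars, hlt, h0]
    rw [take_vector, take_vector_alt]
    simp only [hd]
    rw [fold_pre number.natAbs (by omega), bits_eq]

theorem take_vector_raises : Claim_raises_take_vector := by
  unfold Claim_raises_take_vector
  exact ⟨by intro n _ hR; unfold Raises_take_vector Pre_take_vector at *; omega, by decide⟩

-- self-check: the raise-witness value recorded above is the one the raises theorem certifies
theorem take_vector_raise_witness_ok :
    take_vector_alt pvRaiseWitness_take_vector = pvRaiseWitnessOut_take_vector :=
  take_vector_raises.2.2.2
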